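-- pv_equiv track=rewrite | github.com/aujbl/vehiclespeed | process.py | bounds_filter
-- ===== SOURCE A (Python) =====
-- def bounds_filter(bounds, min_area=50):
--     # 去掉面积较小的区域
--     bounds = [bound for bound in bounds if bound[2]*bound[3] > min_area]
--     # 根据矩形框面积进行排序
--     bounds.sort(key=lambda bound: bound[2]*bound[3], reverse=True)
--     i = 0
--     while i < len(bounds):
--         x1, y1, w1, h1 = bounds[i]
--         new_bounds = []
--         for bound in bounds[i+1:]:
--             x2, y2, w2, h2 = bound
--             if x1 <= x2 <= x1+w1 and y1 <= y2 <= y1+h1: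
--                 pass
--             else:
--                 new_bounds.append(bound)
--         i += 1
--         bounds = bounds[:i]+new_bounds
--     return bounds
-- ===== SOURCE B (Python) =====
-- def bounds_filter(bounds, min_area=50):
--     big = [b for b in bounds if b[2]*b[3] > min_area]
--     big.sort(key=lambda b: b[2]*b[3], reverse=True)
--     kept = []
--     for x2, y2, w2, h2 in big:
--         if not any(x1 <= x2 <= x1+w1 and y1 <= y2 <= y1+h1
--                    for x1, y1, w1, h1 in kept):
--             kept.append((x2, y2, w2, h2))
--     return kept
-- ===== Notes on version B (the rewrite author's own statement) =====
-- stated objective: simpler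
-- what changed: Replaces A's while-loop that repeatedly rebuilds the list by slicing and re-filtering the suffix with a single forward accumulate-and-test pass keeping a rectangle only if its top-left corner lies in no previously kept rectangle.
import Mathlib
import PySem

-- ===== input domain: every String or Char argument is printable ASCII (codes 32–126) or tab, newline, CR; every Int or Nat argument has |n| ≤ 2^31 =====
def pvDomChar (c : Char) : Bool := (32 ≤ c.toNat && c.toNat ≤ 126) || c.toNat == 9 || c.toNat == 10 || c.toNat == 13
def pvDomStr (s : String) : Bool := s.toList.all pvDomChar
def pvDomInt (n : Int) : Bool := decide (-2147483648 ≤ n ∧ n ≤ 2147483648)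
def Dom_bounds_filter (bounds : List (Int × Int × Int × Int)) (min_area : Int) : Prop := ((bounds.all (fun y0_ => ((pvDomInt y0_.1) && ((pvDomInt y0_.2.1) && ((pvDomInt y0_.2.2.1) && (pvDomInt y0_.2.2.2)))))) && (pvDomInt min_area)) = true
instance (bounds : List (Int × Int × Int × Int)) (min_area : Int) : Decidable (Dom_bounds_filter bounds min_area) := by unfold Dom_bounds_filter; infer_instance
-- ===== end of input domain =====

-- B replaces A's while-loop slicing/deletion scheme with one forward accumulate-and-test pass (objective: simpler).
-- ===== PORT A =====
-- A's while loop, step for step: at index i the items after position i whose top-left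
-- corner lies in rectangle i are dropped; bounds[:i+1]+new_bounds is take/++ (nonnegative
-- slices are exact here). fuel makes the loop total; fuel = list length always suffices
-- (the loop runs at most len(bounds) times since len never grows and i increases).
def loopA : Nat → List (Int × Int × Int × Int) → Nat → List (Int × Int × Int × Int)
  | 0, bounds, _ => bounds
  | fuel+1, bounds, i =>
    if h : i < bounds.length then
      let r := bounds[i]
      let new_bounds := (bounds.drop (i+1)).filter (fun b =>
        ¬ (r.1 ≤ b.1 ∧ b.1 ≤ r.1 + r.2.2.1 ∧ r.2.1 ≤ b.2.1 ∧ b.2.1 ≤ r.2.1 + r.2.2.2))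
      loopA fuel (bounds.take (i+1) ++ new_bounds) (i+1)
    else bounds

def bounds_filter (bounds : List (Int × Int × Int × Int)) (min_area : Int) :
    List (Int × Int × Int × Int) :=
  let bounds := bounds.filter (fun b => min_area < b.2.2.1 * b.2.2.2)
  let bounds := PySem.List.sorted bounds (fun b => b.2.2.1 * b.2.2.2) true
  loopA bounds.length bounds 0

-- ===== PORT B =====
def containsB (r b : Int × Int × Int × Int) : Bool :=
  r.1 ≤ b.1 && b.1 ≤ r.1 + r.2.2.1 && r.2.1 ≤ b.2.1 && b.2.1 ≤ r.2.1 + r.2.2.2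

def keepStep (kept : List (Int × Int × Int × Int)) (b : Int × Int × Int × Int) :
    List (Int × Int × Int × Int) :=
  if kept.any (fun r => containsB r b) then kept else kept ++ [b]

def bounds_filter_alt (bounds : List (Int × Int × Int × Int)) (min_area : Int) :
    List (Int × Int × Int × Int) :=
  let big := bounds.filter (fun b => min_area < b.2.2.1 * b.2.2.2)
  let big := PySem.List.sorted big (fun b => b.2.2.1 * b.2.2.2) true
  big.foldl keepStep []

-- ===== PRECONDITION & SPEC =====
def Spec_bounds_filter (bounds : List (Int × Int × Int × Int)) (min_area : Int) (out : List (Int × Int × Int × Int)) : Prop := out = bounds_filter_alt bounds min_area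
instance (bounds : List (Int × Int × Int × Int)) (min_area : Int) (out : List (Int × Int × Int × Int)) : Decidable (Spec_bounds_filter bounds min_area out) := by unfold Spec_bounds_filter; infer_instance

-- ===== CLAIM (what is proved, stated in full; the proofs are below) =====
def Claim_equal_bounds_filter : Prop := ∀ (bounds : List (Int × Int × Int × Int)) (min_area : Int), Dom_bounds_filter bounds min_area → Spec_bounds_filter bounds min_area (bounds_filter bounds min_area)

-- ===== LEMMAS AND PROOFS =====

-- items whose corner lies in some rectangle r already in kept are skipped by B's fold,
-- so pre-filtering them away (as A does) changes nothing
theorem foldl_keepStep_filter (r : Int × Int × Int × Int)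
    (l : List (Int × Int × Int × Int)) (kept : List (Int × Int × Int × Int))
    (hr : r ∈ kept) :
    l.foldl keepStep kept = (l.filter (fun b => ¬ (r.1 ≤ b.1 ∧ b.1 ≤ r.1 + r.2.2.1 ∧ r.2.1 ≤ b.2.1 ∧ b.2.1 ≤ r.2.1 + r.2.2.2))).foldl keepStep kept := by
  induction l generalizing kept with
  | nil => rfl
  | cons c t ih =>
      by_cases hc : r.1 ≤ c.1 ∧ c.1 ≤ r.1 + r.2.2.1 ∧ r.2.1 ≤ c.2.1 ∧ c.2.1 ≤ r.2.1 + r.2.2.2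
      · have hskip : keepStep kept c = kept := by
          unfold keepStep
          have : kept.any (fun q => containsB q c) = true := by
            refine List.any_eq_true.mpr ⟨r, hr, ?_⟩
            simp [containsB, hc.1, hc.2.1, hc.2.2.1, hc.2.2.2]
          simp [this]
        have hf : (c :: t).filter (fun b => ¬ (r.1 ≤ b.1 ∧ b.1 ≤ r.1 + r.2.2.1 ∧ r.2.1 ≤ b.2.1 ∧ b.2.1 ≤ r.2.1 + r.2.2.2)) = t.filter (fun b => decide ¬ (r.1 ≤ b.1 ∧ b.1 ≤ r.1 + r.2.2.1 ∧ r.2.1 ≤ b.2.1 ∧ b.2.1 ≤ r.2.1 + r.2.2.2)) := by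
          exact List.filter_cons_of_neg (by simp only [decide_not, Bool.not_eq_true', decide_eq_false_iff_not]; exact not_not_intro hc)
        rw [hf, List.foldl_cons, hskip]
        exact ih kept hr
      · have hf : (c :: t).filter (fun b => ¬ (r.1 ≤ b.1 ∧ b.1 ≤ r.1 + r.2.2.1 ∧ r.2.1 ≤ b.2.1 ∧ b.2.1 ≤ r.2.1 + r.2.2.2)) = c :: t.filter (fun b => decide ¬ (r.1 ≤ b.1 ∧ b.1 ≤ r.1 + r.2.2.1 ∧ r.2.1 ≤ b.2.1 ∧ b.2.1 ≤ r.2.1 + r.2.2.2)) := by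
          exact List.filter_cons_of_pos (by simp only [decide_eq_true_eq]; exact hc)
        rw [hf, List.foldl_cons, List.foldl_cons]
        have hrk : r ∈ keepStep kept c := by
          unfold keepStep; split
          · exact hr
          · exact List.mem_append_left _ hr
        exact ih (keepStep kept c) hrk

-- the bridge: A's loop started after a settled prefix k (none of rest contained in k)
-- equals B's fold from accumulator k; induction on the fuel
theorem loopA_eq_foldl (fuel : Nat) (rest k : List (Int × Int × Int × Int))
    (hfuel : rest.length ≤ fuel)
    (h : ∀ b ∈ rest, k.any (fun r => containsB r b) = false) :
    loopA fuel (k ++ rest) k.length = rest.foldl keepStep k := by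
  induction fuel generalizing rest k with
  | zero =>
      have : rest = [] := List.eq_nil_of_length_eq_zero (Nat.le_zero.mp hfuel)
      subst this
      simp [loopA]
  | succ fuel ih =>
      cases rest with
      | nil =>
          unfold loopA
          simp
      | cons b t =>
          unfold loopA
          have hlen : k.length < (k ++ b :: t).length := by simp
          rw [dif_pos hlen]
          have hget : (k ++ b :: t)[k.length]'hlen = b := by
            simp
          have hdrop : (k ++ b :: t).drop (k.length + 1) = t := by
            rw [show k.length + 1 = (k ++ [b]).length by simp,
                show k ++ b :: t = (k ++ [b]) ++ t by simp]
            exact List.drop_left ..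
          have htake : (k ++ b :: t).take (k.length + 1) = k ++ [b] := by
            rw [show k.length + 1 = (k ++ [b]).length by simp,
                show k ++ b :: t = (k ++ [b]) ++ t by simp]
            exact List.take_left ..
          simp only [hget, hdrop, htake]
          set f := fun (c : Int × Int × Int × Int) =>
            ¬ (b.1 ≤ c.1 ∧ c.1 ≤ b.1 + b.2.2.1 ∧ b.2.1 ≤ c.2.1 ∧ c.2.1 ≤ b.2.1 + b.2.2.2) with hfdef
          have hlen2 : (k ++ [b]).length = k.length + 1 := by simp
          rw [← hlen2]
          have hfuel2 : (t.filter (fun c => decide (f c))).length ≤ fuel := by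
            have h1 := List.length_filter_le (fun c => decide (f c)) t
            simp only [List.length_cons] at hfuel
            omega
          have hrec : ∀ c ∈ t.filter (fun c => decide (f c)),
              (k ++ [b]).any (fun r => containsB r c) = false := by
            intro c hc
            have hmem := List.mem_filter.mp hc
            have hfc : f c := by simpa using hmem.2
            have hk := h c (List.mem_cons_of_mem _ hmem.1)
            simp only [List.any_append, List.any_cons, List.any_nil, Bool.or_eq_false_iff]
            refine ⟨hk, ?_⟩
            simp only [hfdef] at hfc
            simp [containsB]
            omega
          rw [ih (t.filter (fun c => decide (f c))) (k ++ [b]) hfuel2 hrec]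
          -- B side: b is appended (its corner is in no rectangle of k), then fold over t
          have hb : k.any (fun r => containsB r b) = false := h b (List.mem_cons_self)
          have hstep : keepStep k b = k ++ [b] := by
            unfold keepStep; simp [hb]
          rw [List.foldl_cons, hstep]
          have hbmem : b ∈ k ++ [b] := by simp
          rw [foldl_keepStep_filter b t (k ++ [b]) hbmem]

-- ===== VERDICT (by name: the statement is the Claim_ definition above) =====
theorem bounds_filter_spec : Claim_equal_bounds_filter := by
  intro bounds min_area _
  unfold Spec_bounds_filter bounds_filter bounds_filter_alt
  have := loopA_eq_foldl
    (PySem.List.sorted (bounds.filter (fun b => min_area < b.2.2.1 * b.2.2.2))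
      (fun b => b.2.2.1 * b.2.2.2) true).length
    (PySem.List.sorted (bounds.filter (fun b => min_area < b.2.2.1 * b.2.2.2))
      (fun b => b.2.2.1 * b.2.2.2) true) []
    (Nat.le_refl _)
    (by intro b _; simp)
  exact this
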